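-- pv_equiv track=rewrite | github.com/ALambeth/BioinformaticAlgorithms | BA4E/ba4e.py | consistent
-- ===== SOURCE A (Python) =====
-- mass = [57,71,87,97,99,101,103,113,114,115,128,129,131,137,147,156,163,186]
--
-- def linear(p):
--     prefix = [0]
--     length = len(p)
--     for x in range(length):
--         temp = prefix[x] + p[x]
--         prefix.append(temp)
--     lin = [0]
--     for x in range(length):
--         for y in range(x + 1, length + 1):
--             lin.append(prefix[y] - prefix[x])
--     lin.sort()
--     return lin
--
-- def consistent(pep, spectrum):
--     if sum(pep) > int(spectrum[len(spectrum) - 1]) - mass[0]: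
--         return False
--     x = linear(pep)
--     for i in x:
--         if i not in spectrum:
--             return False
--     return True
-- ===== SOURCE B (Python) =====
-- def consistent(pep, spectrum):
--     if sum(pep) > int(spectrum[len(spectrum) - 1]) - 57:
--         return False
--     if 0 not in spectrum:
--         return False
--     rest = pep
--     while rest:
--         total = 0
--         for v in rest:
--             total += v
--             if total not in spectrum:
--                 return False
--         rest = rest[1:]
--     return True
-- ===== Notes on version B (the rewrite author's own statement) =====
-- stated objective: simpler
-- what changed: B drops A's prefix-sum table, the generated-and-sorted list of all subpeptide masses and the final membership pass, and instead checks each contiguous subpeptide mass directly with a running sum per suffix (plus the mass-0 entry), exiting early on the first miss.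
import Mathlib
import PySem

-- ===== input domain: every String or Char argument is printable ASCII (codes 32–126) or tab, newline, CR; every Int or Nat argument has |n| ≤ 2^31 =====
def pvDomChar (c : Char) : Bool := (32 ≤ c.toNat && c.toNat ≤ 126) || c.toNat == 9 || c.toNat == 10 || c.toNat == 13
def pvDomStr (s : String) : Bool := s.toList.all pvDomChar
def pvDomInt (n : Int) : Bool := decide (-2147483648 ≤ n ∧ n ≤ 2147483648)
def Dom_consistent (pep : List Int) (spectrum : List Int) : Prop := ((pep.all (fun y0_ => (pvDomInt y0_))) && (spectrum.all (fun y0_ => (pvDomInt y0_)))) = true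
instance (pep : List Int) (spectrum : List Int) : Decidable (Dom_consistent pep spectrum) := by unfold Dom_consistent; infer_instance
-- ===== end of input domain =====

-- B replaces A's prefix-sum table + sorted linear-spectrum list by direct running sums over each
-- suffix with early exit (objective: simpler; return value only, no mutation).

-- ===== PORT A =====
def massA : List Int := [57,71,87,97,99,101,103,113,114,115,128,129,131,137,147,156,163,186]

-- linear(p): prefix-sum table, all differences, plus the 0 entry, sorted
def linear (p : List Int) : List Int :=
  let length : Int := p.length
  let pre := (PySem.List.pyRange 0 length 1).foldl
      (fun pre x => pre ++ [PySem.List.pyGetD pre x 0 + PySem.List.pyGetD p x 0]) [0]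
  let lin := (PySem.List.pyRange 0 length 1).foldl
      (fun lin x => (PySem.List.pyRange (x+1) (length+1) 1).foldl
          (fun lin y => lin ++ [PySem.List.pyGetD pre y 0 - PySem.List.pyGetD pre x 0]) lin) [0]
  PySem.List.sorted lin (fun v => v) false

-- the final loop of consistent: 'for i in x: if i not in spectrum: return False / return True'
def checkAllA (spectrum : List Int) : List Int → Bool
  | [] => true
  | i :: rest => if !(spectrum.contains i) then false else checkAllA spectrum rest

def consistent (pep : List Int) (spectrum : List Int) : Bool :=
  if pep.sum > PySem.List.pyGetD spectrum ((spectrum.length : Int) - 1) 0 - PySem.List.pyGetD massA 0 0 then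
    false
  else
    checkAllA spectrum (linear pep)

-- ===== PORT B =====
-- inner 'for v in rest: total += v; if total not in spectrum: return False'
def altScan (spectrum : List Int) : Int → List Int → Bool
  | _, [] => true
  | total, v :: rest =>
      let t := total + v
      if !(spectrum.contains t) then false else altScan spectrum t rest

-- outer 'while rest: …; rest = rest[1:]'
def altOuter (spectrum : List Int) : List Int → Bool
  | [] => true
  | v :: tl => if altScan spectrum 0 (v :: tl) then altOuter spectrum tl else false

def consistent_alt (pep : List Int) (spectrum : List Int) : Bool :=
  if pep.sum > PySem.List.pyGetD spectrum ((spectrum.length : Int) - 1) 0 - 57 then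
    false
  else if !(spectrum.contains 0) then
    false
  else
    altOuter spectrum pep

-- ===== PRECONDITION & SPEC =====
-- Pre_ excludes only the empty spectrum, where both A and B raise IndexError on spectrum[-1].
def Pre_consistent (pep : List Int) (spectrum : List Int) : Prop := spectrum ≠ []
instance (pep : List Int) (spectrum : List Int) : Decidable (Pre_consistent pep spectrum) := by unfold Pre_consistent; infer_instance
def pvWitness_consistent : List Int × List Int := ([57, 71], [0, 57, 71, 128])

def Spec_consistent (pep : List Int) (spectrum : List Int) (out : Bool) : Prop := out = consistent_alt pep spectrum
instance (pep : List Int) (spectrum : List Int) (out : Bool) : Decidable (Spec_consistent pep spectrum out) := by unfold Spec_consistent; infer_instance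

-- ===== CLAIM (what is proved, stated in full; the proofs are below) =====
def Claim_equal_consistent : Prop := ∀ (pep : List Int) (spectrum : List Int), Dom_consistent pep spectrum → Pre_consistent pep spectrum → Spec_consistent pep spectrum (consistent pep spectrum)

-- ===== LEMMAS AND PROOFS =====

-- list of running sums t + p[0], t + p[0] + p[1], …
def pSums (t : Int) : List Int → List Int
  | [] => []
  | v :: r => (t + v) :: pSums (t + v) r

theorem altScan_eq_all (spectrum : List Int) (t : Int) (l : List Int) :
    altScan spectrum t l = (pSums t l).all (fun i => spectrum.contains i) := by
  induction l generalizing t with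
  | nil => rfl
  | cons v r ih =>
      simp only [altScan, pSums, List.all_cons]
      by_cases h : spectrum.contains (t + v) <;> simp only [h] <;> simp [ih]

theorem checkAllA_eq_all (spectrum : List Int) (l : List Int) :
    checkAllA spectrum l = l.all (fun i => spectrum.contains i) := by
  induction l with
  | nil => rfl
  | cons i r ih =>
      simp only [checkAllA, List.all_cons]
      by_cases h : spectrum.contains i <;> simp only [h] <;> simp [ih]

theorem altOuter_eq_all (spectrum : List Int) (l : List Int) :
    altOuter spectrum l
      = (List.range l.length).all (fun x => altScan spectrum 0 (l.drop x)) := by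
  induction l with
  | nil => rfl
  | cons v tl ih =>
      simp only [altOuter, List.length_cons, List.range_succ_eq_map, List.all_cons,
        List.all_map, List.drop_zero]
      by_cases h : altScan spectrum 0 (v :: tl) <;>
        simp [h, ih, Function.comp_def]

-- the prefix table A builds is the list of prefix sums of p
theorem prefix_fold_aux (p : List Int) (n : Nat) :
    ∀ a : Nat, p.length = a + n →
    (PySem.List.pyRange (a : Int) (p.length : Int) 1).foldl
        (fun pre x => pre ++ [PySem.List.pyGetD pre x 0 + PySem.List.pyGetD p x 0])
        ((List.range (a + 1)).map (fun k => (p.take k).sum))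
      = (List.range (p.length + 1)).map (fun k => (p.take k).sum) := by
  induction n with
  | zero =>
      intro a ha
      rw [PySem.List.pyRange_one_eq_nil (by omega)]
      simp [ha]
  | succ n ih =>
      intro a ha
      have hlt : (a : Int) < (p.length : Int) := by
        have : a < p.length := by omega
        exact_mod_cast this
      rw [PySem.List.pyRange_one_cons hlt]
      simp only [List.foldl_cons]
      have h1 : PySem.List.pyGetD ((List.range (a + 1)).map (fun k => (p.take k).sum)) (a : Int) 0
          = (p.take a).sum := by
        rw [PySem.List.pyGetD_natCast, List.getD_eq_getElem _ _ (by simp)]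
        simp
      have h2 : PySem.List.pyGetD p (a : Int) 0 = (p.take a).sum + p[a]'(by omega) - (p.take a).sum := by
        rw [PySem.List.pyGetD_natCast, List.getD_eq_getElem _ _ (by omega)]
        ring
      have hstate : ((List.range (a + 1)).map (fun k => (p.take k).sum)) ++
          [PySem.List.pyGetD ((List.range (a + 1)).map (fun k => (p.take k).sum)) (a : Int) 0
            + PySem.List.pyGetD p (a : Int) 0]
          = (List.range (a + 1 + 1)).map (fun k => (p.take k).sum) := by
        rw [h1, h2, List.range_succ (n := a + 1), List.map_append]
        simp [List.sum_take_succ p a (by omega)]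
      rw [hstate]
      have hcast : (a : Int) + 1 = ((a + 1 : Nat) : Int) := by push_cast; ring
      rw [hcast]
      exact ih (a + 1) (by omega)

theorem prefix_fold_eq (p : List Int) :
    (PySem.List.pyRange 0 (p.length : Int) 1).foldl
        (fun pre x => pre ++ [PySem.List.pyGetD pre x 0 + PySem.List.pyGetD p x 0]) [0]
      = (List.range (p.length + 1)).map (fun k => (p.take k).sum) := by
  have h := prefix_fold_aux p p.length 0 (by omega)
  simpa using h

-- pSums as prefix-sum differences
theorem pSums_eq_map (t : Int) (l : List Int) :
    pSums t l = (List.range l.length).map (fun j => t + (l.take (j + 1)).sum) := by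
  induction l generalizing t with
  | nil => rfl
  | cons v r ih =>
      simp only [pSums, List.length_cons, List.range_succ_eq_map, List.map_cons, List.map_map]
      refine congrArg₂ List.cons (by simp) ?_
      rw [ih (t + v)]
      apply List.map_congr_left
      intro j hj
      simp [List.take_succ_cons, add_assoc]

-- one inner loop of A = the running sums of the suffix starting at x
theorem lin_inner_eq (p : List Int) (x : Nat) (hx : x < p.length) :
    (PySem.List.pyRange ((x : Int) + 1) ((p.length : Int) + 1) 1).map
        (fun y => PySem.List.pyGetD ((List.range (p.length + 1)).map (fun k => (p.take k).sum)) y 0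
                 - PySem.List.pyGetD ((List.range (p.length + 1)).map (fun k => (p.take k).sum)) (x : Int) 0)
      = pSums 0 (p.drop x) := by
  rw [PySem.List.pyRange_one, pSums_eq_map, List.map_map, List.length_drop]
  have hlen : (((p.length : Int) + 1) - ((x : Int) + 1)).toNat = p.length - x := by omega
  rw [hlen]
  apply List.map_congr_left
  intro k hk
  simp only [List.mem_range] at hk
  simp only [Function.comp_def]
  have hPx : PySem.List.pyGetD ((List.range (p.length + 1)).map (fun k => (p.take k).sum)) (x : Int) 0
      = (p.take x).sum := by
    rw [PySem.List.pyGetD_natCast, List.getD_eq_getElem _ _ (by simp; omega)]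
    simp
  have hidx : (x : Int) + 1 + (k : Int) = ((x + (k + 1) : Nat) : Int) := by push_cast; ring
  have hPy : PySem.List.pyGetD ((List.range (p.length + 1)).map (fun k => (p.take k).sum))
        ((x : Int) + 1 + (k : Int)) 0 = (p.take (x + (k + 1))).sum := by
    rw [hidx, PySem.List.pyGetD_natCast, List.getD_eq_getElem _ _ (by simp; omega)]
    simp
  rw [hPx, hPy, List.take_add, List.sum_append]
  ring

-- the unsorted lin list is 0 followed by all suffix running sums
theorem lin_fold_eq (p : List Int) :
    (PySem.List.pyRange 0 (p.length : Int) 1).foldl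
        (fun lin x => (PySem.List.pyRange (x + 1) ((p.length : Int) + 1) 1).foldl
            (fun lin y => lin ++ [PySem.List.pyGetD ((List.range (p.length + 1)).map (fun k => (p.take k).sum)) y 0
                 - PySem.List.pyGetD ((List.range (p.length + 1)).map (fun k => (p.take k).sum)) x 0]) lin) [0]
      = 0 :: (List.range p.length).flatMap (fun x => pSums 0 (p.drop x)) := by
  have hfun : (fun (lin : List Int) (x : Int) =>
        (PySem.List.pyRange (x + 1) ((p.length : Int) + 1) 1).foldl
            (fun lin y => lin ++ [PySem.List.pyGetD ((List.range (p.length + 1)).map (fun k => (p.take k).sum)) y 0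
                 - PySem.List.pyGetD ((List.range (p.length + 1)).map (fun k => (p.take k).sum)) x 0]) lin)
      = (fun (lin : List Int) (x : Int) => lin ++
        (PySem.List.pyRange (x + 1) ((p.length : Int) + 1) 1).map
            (fun y => PySem.List.pyGetD ((List.range (p.length + 1)).map (fun k => (p.take k).sum)) y 0
                 - PySem.List.pyGetD ((List.range (p.length + 1)).map (fun k => (p.take k).sum)) x 0)) := by
    funext lin x
    exact PySem.List.foldl_append_singleton_eq_map _ _ _
  rw [hfun, PySem.List.foldl_append_eq_flatMap, PySem.List.pyRange_zero_nat, List.flatMap_map]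
  simp only [List.cons_append, List.nil_append]
  refine congrArg (List.cons 0) ?_
  rw [List.flatMap_def, List.flatMap_def]
  refine congrArg List.flatten (List.map_congr_left ?_)
  intro x hxmem
  simp only [List.mem_range] at hxmem
  simpa [Function.comp_def] using lin_inner_eq p x hxmem

theorem linear_all (p spectrum : List Int) :
    checkAllA spectrum (linear p)
      = (spectrum.contains 0 && (List.range p.length).all (fun x => altScan spectrum 0 (p.drop x))) := by
  unfold linear
  simp only [checkAllA_eq_all]
  rw [prefix_fold_eq, lin_fold_eq,
    (PySem.List.sorted_perm _ _ _).all_eq, List.all_cons, List.all_flatMap]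
  refine congrArg₂ (· && ·) rfl
    (congrArg (List.all (List.range p.length))
      (funext fun x => (altScan_eq_all spectrum 0 (p.drop x)).symm))

-- ===== VERDICT (by name: the statement is the Claim_ definition above) =====
theorem consistent_spec : Claim_equal_consistent := by
  intro pep spectrum _ _
  unfold Spec_consistent consistent consistent_alt
  have hm : PySem.List.pyGetD massA 0 0 = (57 : Int) := by decide
  rw [hm]
  by_cases hg : pep.sum > PySem.List.pyGetD spectrum ((spectrum.length : Int) - 1) 0 - 57
  · simp [hg]
  · simp only [hg, if_false]
    rw [linear_all, altOuter_eq_all]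
    by_cases h0 : spectrum.contains 0 <;> simp only [h0] <;> simp
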